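-- pv_equiv track=rewrite | github.com/GTML-LAB/Equitorch | equitorch/utils/_indices.py | extract_batch_segments
-- ===== SOURCE A (Python) =====
-- from typing import List, Tuple, Any
--
-- def extract_batch_segments(keys: List[List[int]]):
--     r"""
--     Process sorted integer key lists to generate batch indices, boundary pointers, and key values.
--
--     Parameters
--     ----------
--     keys : List[List[int]]
--         A list of sorted integer key lists. All lists must have the same length.
--
--     Returns
--     -------
--     batch : List[int]
--         A list where each element indicates the batch index it belongs to.
--     seg : List[int]
--         A list of boundary pointers indicating the start and end of each batch.
--     val : List[List[int]]
--         A list of lists containing the key values at the boundary points for each key list.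
--
--     Notes
--     -----
--     - The input key lists must be sorted in ascending order.
--     - If the input is empty, the function returns empty lists for `batch`, `seg`, and `val`.
--
--     Examples
--     --------
--     >>> keys = [
--     ...     [1, 1, 2, 2],
--     ...     [1, 1, 2, 2]
--     ... ]
--     >>> extract_batch_seg_native(keys)
--     ([0, 0, 1, 1], [0, 2, 4], [[1, 2], [1, 2]])
--
--     >>> keys = [
--     ...     [5, 5, 5],
--     ...     [5, 5, 5]
--     ... ]
--     >>> extract_batch_seg_native(keys)
--     ([0, 0, 0], [0, 3], [[5], [5]])
--
--     >>> keys = [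
--     ...     [1, 1, 2, 3, 3],
--     ...     [1, 2, 2, 3, 3]
--     ... ]
--     >>> extract_batch_seg_native(keys)
--     ([0, 1, 2, 3, 3], [0, 1, 2, 3, 5], [[1, 1, 2, 3], [1, 2, 2, 3]])
--     """
--     if not keys or not keys[0]:
--         return [], [], []
--
--     length = len(keys[0])
--     seg = [0]  # 初始化分界指针
--
--     # 生成分界指针
--     for i in range(length):
--         last_idx = seg[-1]
--         # 检查所有键在当前索引i处是否与上一个分界点的值不同
--         if any(key[i] != key[last_idx] for key in keys):
--             seg.append(i)
--
--     seg.append(length)  # 添加最终边界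
--
--     # 生成批次索引
--     batch = [0] * length
--     for batch_idx in range(1, len(seg)):
--         start = seg[batch_idx-1]
--         end = seg[batch_idx]
--         for i in range(start, end):
--             batch[i] = batch_idx - 1
--
--     # 提取分界点键值
--     val = [
--         [key[boundary] for boundary in seg[:-1]]  # 排除最后一个边界
--         for key in keys
--     ]
--
--     return batch, seg, val
-- ===== SOURCE B (Python) =====
-- def extract_batch_segments(keys):
--     if not keys or not keys[0]:
--         return [], [], []
--     length = len(keys[0])
--     batch = [0]
--     seg = [0]
--     val = [[key[0]] for key in keys]
--     cur = 0
--     for i in range(1, length):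
--         if any(key[i] != key[i - 1] for key in keys):
--             cur += 1
--             seg.append(i)
--             for j, key in enumerate(keys):
--                 val[j].append(key[i])
--         batch.append(cur)
--     seg.append(length)
--     return batch, seg, val
-- ===== Notes on version B (the rewrite author's own statement) =====
-- stated objective: alternative
-- what changed: A detects boundaries by comparing each column to the last recorded segment start and then back-fills batch indices and extracts boundary values in two further passes; B is one fused forward pass that compares consecutive columns and grows batch, seg and val incrementally with a running segment counter.
import Mathlib
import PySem

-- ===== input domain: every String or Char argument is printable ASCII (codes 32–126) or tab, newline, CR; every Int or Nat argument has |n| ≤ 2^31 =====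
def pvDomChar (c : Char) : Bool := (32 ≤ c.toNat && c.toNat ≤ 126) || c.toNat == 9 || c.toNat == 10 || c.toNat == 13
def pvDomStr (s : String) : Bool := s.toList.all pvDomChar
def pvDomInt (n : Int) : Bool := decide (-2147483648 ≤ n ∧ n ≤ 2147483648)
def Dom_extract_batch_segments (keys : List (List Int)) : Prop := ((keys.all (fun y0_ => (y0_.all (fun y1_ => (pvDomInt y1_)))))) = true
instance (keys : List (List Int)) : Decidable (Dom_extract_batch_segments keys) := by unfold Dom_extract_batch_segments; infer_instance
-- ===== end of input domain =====

-- B fuses A's three passes (boundary detection vs last segment start, batch back-fill, val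
-- comprehension) into one forward pass comparing consecutive columns with a running counter.


-- ===== PORT A =====
-- A's seg-loop body: compare column i against the column at the last recorded boundary
def segStepA (keys : List (List Int)) (seg : List Int) (i : Int) : List Int :=
  let lastIdx := PySem.List.pyGetD seg (-1) 0
  if keys.any (fun key => PySem.List.pyGetD key i 0 != PySem.List.pyGetD key lastIdx 0)
  then seg ++ [i] else seg

-- A's batch back-fill body: write batch_idx-1 on [seg[batch_idx-1], seg[batch_idx])
def fillStepA (seg : List Int) (batch : List Int) (bidx : Int) : List Int :=
  let start := PySem.List.pyGetD seg (bidx - 1) 0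
  let stop := PySem.List.pyGetD seg bidx 0
  (PySem.List.pyRange start stop 1).foldl (fun batch i => PySem.List.pySetD batch i (bidx - 1)) batch

def extract_batch_segments (keys : List (List Int)) : List Int × List Int × List (List Int) :=
  match keys with
  | [] => ([], [], [])
  | k0 :: _ =>
    if k0 = [] then ([], [], [])
    else
      let length : Int := (k0.length : Int)
      let seg : List Int := (PySem.List.pyRange 0 length 1).foldl (segStepA keys) [0]
      let seg := seg ++ [length]
      let batch : List Int := PySem.List.pyRepeat [0] length
      let batch := (PySem.List.pyRange 1 (seg.length : Int) 1).foldl (fillStepA seg) batch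
      let val := keys.map (fun key =>
        (PySem.List.slice seg none (some (-1))).map (fun b => PySem.List.pyGetD key b 0))
      (batch, seg, val)

-- ===== PORT B =====
-- B's fused loop body: compare column i against column i-1; grow batch/seg/val incrementally
def stepB (keys : List (List Int)) (st : List Int × List Int × List (List Int) × Int) (i : Int) :
    List Int × List Int × List (List Int) × Int :=
  let batch := st.1
  let seg := st.2.1
  let val := st.2.2.1
  let cur := st.2.2.2
  if keys.any (fun key => PySem.List.pyGetD key i 0 != PySem.List.pyGetD key (i - 1) 0)
  then (batch ++ [cur + 1], seg ++ [i],
        (val.zip keys).map (fun vk => vk.1 ++ [PySem.List.pyGetD vk.2 i 0]), cur + 1)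
  else (batch ++ [cur], seg, val, cur)

def extract_batch_segments_alt (keys : List (List Int)) : List Int × List Int × List (List Int) :=
  match keys with
  | [] => ([], [], [])
  | k0 :: _ =>
    if k0 = [] then ([], [], [])
    else
      let length : Int := (k0.length : Int)
      let st := (PySem.List.pyRange 1 length 1).foldl (stepB keys)
        ([0], [0], keys.map (fun key => [PySem.List.pyGetD key 0 0]), 0)
      (st.1, st.2.1 ++ [length], st.2.2.1)

-- ===== PRECONDITION & SPEC =====
-- Pre_ excludes exactly the inputs on which the Python A raises IndexError: some key list
-- shorter than keys[0] (the docstring requires equal lengths; A returns on all other inputs).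
def Pre_extract_batch_segments (keys : List (List Int)) : Prop :=
  (keys.all (fun k => decide ((keys.headD []).length ≤ k.length))) = true
instance (keys : List (List Int)) : Decidable (Pre_extract_batch_segments keys) := by
  unfold Pre_extract_batch_segments; infer_instance

def pvWitness_extract_batch_segments : List (List Int) := [[1, 1, 2, 3, 3], [1, 2, 2, 3, 3]]

def Spec_extract_batch_segments (keys : List (List Int)) (out : List Int × List Int × List (List Int)) : Prop := out = extract_batch_segments_alt keys
instance (keys : List (List Int)) (out : List Int × List Int × List (List Int)) : Decidable (Spec_extract_batch_segments keys out) := by unfold Spec_extract_batch_segments; infer_instance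

-- ===== CLAIM (what is proved, stated in full; the proofs are below) =====
def Claim_equal_extract_batch_segments : Prop := ∀ (keys : List (List Int)), Dom_extract_batch_segments keys → Pre_extract_batch_segments keys → Spec_extract_batch_segments keys (extract_batch_segments keys)

-- ===== LEMMAS AND PROOFS =====

-- the i-th column of keys (with pyGetD's default, as in both ports)
def colv (keys : List (List Int)) (i : Int) : List Int :=
  keys.map (fun k => PySem.List.pyGetD k i 0)

-- batch pattern determined by internal boundaries bs and endpoint n
def patB : Int → List Nat → Nat → List Int
  | _, [], _ => []
  | k, [a], n => List.replicate (n - a) k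
  | k, a :: b :: r, n => List.replicate (b - a) k ++ patB (k + 1) (b :: r) n

theorem set_append_length (P R : List Int) (r v : Int) :
    (P ++ r :: R).set P.length v = P ++ v :: R := by
  induction P with
  | nil => simp
  | cons p P ih => simp [ih]

theorem inner_fill : ∀ (c : Nat) (s : Nat) (v : Int) (P R : List Int),
    P.length = s → c ≤ R.length →
    (PySem.List.pyRange (s : Int) ((s + c : Nat) : Int) 1).foldl
      (fun b i => PySem.List.pySetD b i v) (P ++ R)
      = P ++ List.replicate c v ++ R.drop c := by
  intro c
  induction c with
  | zero => intro s v P R _ _; simp [PySem.List.pyRange_one_eq_nil]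
  | succ c ih =>
    intro s v P R hP hc
    match R with
    | [] => simp at hc
    | r0 :: R' =>
      have hcons : PySem.List.pyRange (s : Int) ((s + (c+1) : Nat) : Int) 1
          = (s : Int) :: PySem.List.pyRange ((s : Int) + 1) ((s + (c+1) : Nat) : Int) 1 := by
        apply PySem.List.pyRange_one_cons; push_cast; omega
      rw [hcons]
      simp only [List.foldl_cons]
      have hset : PySem.List.pySetD (P ++ r0 :: R') (s : Int) v = (P ++ [v]) ++ R' := by
        rw [PySem.List.pySetD_natCast, ← hP, set_append_length]; simp
      rw [hset]
      have harg : ((s + (c+1) : Nat) : Int) = (((s + 1) + c : Nat) : Int) := by push_cast; omega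
      have hstart : ((s : Int) + 1) = (((s + 1 : Nat)) : Int) := by push_cast; ring
      rw [harg, hstart, ih (s+1) v (P ++ [v]) R' (by simp [hP]) (by simpa using hc)]
      simp [List.replicate_succ]

theorem backfill : ∀ (rest pre : List Nat) (a n : Nat) (P : List Int) (segFull : List Int),
    segFull = (pre ++ a :: rest ++ [n]).map (fun j => (j : Int)) →
    List.Pairwise (· ≤ ·) (a :: rest) → (∀ x ∈ a :: rest, x ≤ n) →
    P.length = a →
    (PySem.List.pyRange ((pre.length : Int) + 1) ((segFull.length : Int)) 1).foldl
      (fillStepA segFull) (P ++ List.replicate (n - a) 0)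
      = P ++ patB (pre.length : Int) (a :: rest) n := by
  intro rest
  induction rest with
  | nil =>
    intro pre a n P segFull hseg hpw hmem hP
    have han : a ≤ n := hmem a (by simp)
    have hlen : segFull.length = pre.length + 2 := by simp [hseg]
    have hrange : PySem.List.pyRange ((pre.length : Int) + 1) ((segFull.length : Int)) 1
        = [(pre.length : Int) + 1] := by
      rw [hlen]; push_cast
      rw [show ((pre.length : Int) + 2) = ((pre.length : Int) + 1) + 1 by ring,
        PySem.List.pyRange_one_singleton]
    have hga : PySem.List.pyGetD segFull ((pre.length : Int) + 1 - 1) 0 = (a : Int) := by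
      rw [show ((pre.length : Int) + 1 - 1) = ((pre.length : Nat) : Int) by ring]
      rw [PySem.List.pyGetD_natCast, hseg]
      simp [List.getD_eq_getElem?_getD, List.getElem?_append_right]
    have hgn : PySem.List.pyGetD segFull ((pre.length : Int) + 1) 0 = (n : Int) := by
      rw [show ((pre.length : Int) + 1) = ((pre.length + 1 : Nat) : Int) by push_cast; ring]
      rw [PySem.List.pyGetD_natCast, hseg]
      simp [List.getD_eq_getElem?_getD, List.getElem?_append_right]
    have hstep : fillStepA segFull (P ++ List.replicate (n - a) 0) ((pre.length : Int) + 1)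
        = P ++ List.replicate (n - a) ((pre.length : Int)) := by
      unfold fillStepA
      rw [hga, hgn]
      simp only [show ((pre.length : Int) + 1 - 1) = (pre.length : Int) by ring]
      rw [show ((n : Nat) : Int) = ((a + (n - a) : Nat) : Int) by push_cast; omega]
      rw [inner_fill (n - a) a (pre.length : Int) P (List.replicate (n - a) 0) hP (by simp)]
      simp
    rw [hrange]
    simp only [List.foldl_cons, List.foldl_nil]
    rw [hstep]
    simp [patB]
  | cons b rest' ih =>
    intro pre a n P segFull hseg hpw hmem hP
    have hab : a ≤ b := (List.pairwise_cons.mp hpw).1 b (by simp)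
    have hbn : b ≤ n := hmem b (by simp)
    have hlen : (pre.length : Int) + 1 < (segFull.length : Int) := by
      simp [hseg]; push_cast; omega
    have hcons : PySem.List.pyRange ((pre.length : Int) + 1) ((segFull.length : Int)) 1
        = ((pre.length : Int) + 1) :: PySem.List.pyRange ((pre.length : Int) + 1 + 1) ((segFull.length : Int)) 1 :=
      PySem.List.pyRange_one_cons hlen
    have hga : PySem.List.pyGetD segFull ((pre.length : Int) + 1 - 1) 0 = (a : Int) := by
      rw [show ((pre.length : Int) + 1 - 1) = ((pre.length : Nat) : Int) by ring]
      rw [PySem.List.pyGetD_natCast, hseg]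
      simp [List.getD_eq_getElem?_getD, List.getElem?_append_right]
    have hgb : PySem.List.pyGetD segFull ((pre.length : Int) + 1) 0 = (b : Int) := by
      rw [show ((pre.length : Int) + 1) = ((pre.length + 1 : Nat) : Int) by push_cast; ring]
      rw [PySem.List.pyGetD_natCast, hseg]
      simp [List.getD_eq_getElem?_getD, List.getElem?_append_right]
    have hstep : fillStepA segFull (P ++ List.replicate (n - a) 0) ((pre.length : Int) + 1)
        = (P ++ List.replicate (b - a) ((pre.length : Int))) ++ List.replicate (n - b) 0 := by
      unfold fillStepA
      rw [hga, hgb]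
      simp only [show ((pre.length : Int) + 1 - 1) = (pre.length : Int) by ring]
      rw [show ((b : Nat) : Int) = ((a + (b - a) : Nat) : Int) by push_cast; omega]
      rw [inner_fill (b - a) a (pre.length : Int) P (List.replicate (n - a) 0) hP
        (by rw [List.length_replicate]; omega)]
      rw [List.drop_replicate]
      rw [show (n - a) - (b - a) = n - b by omega]
    rw [hcons]
    simp only [List.foldl_cons]
    rw [hstep]
    have hseg' : segFull = ((pre ++ [a]) ++ b :: rest' ++ [n]).map (fun j => (j : Int)) := by
      rw [hseg]; congr 1; simp
    have hstart : ((pre.length : Int) + 1 + 1) = (((pre ++ [a]).length : Nat) : Int) + 1 := by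
      simp
    rw [hstart]
    rw [ih (pre ++ [a]) b n (P ++ List.replicate (b - a) ((pre.length : Int))) segFull hseg'
      (List.pairwise_cons.mp hpw).2 (fun x hx => hmem x (by simp at hx ⊢; tauto))
      (by simp [hP]; omega)]
    rw [show (((pre ++ [a]).length : Nat) : Int) = (pre.length : Int) + 1 by simp]
    simp [patB]

theorem patB_snoc_end : ∀ (r : List Nat) (k : Int) (a m : Nat), (∀ x ∈ a :: r, x ≤ m) →
    patB k (a :: r) (m + 1) = patB k (a :: r) m ++ [k + r.length] := by
  intro r
  induction r with
  | nil =>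
    intro k a m hmem
    have : a ≤ m := hmem a (by simp)
    simp [patB, show m + 1 - a = (m - a) + 1 by omega, List.replicate_succ']
  | cons b r' ih =>
    intro k a m hmem
    simp only [patB]
    rw [ih (k + 1) b m (fun x hx => hmem x (by simp at hx ⊢; tauto))]
    simp; ring_nf

theorem patB_boundary : ∀ (r : List Nat) (k : Int) (a m : Nat), (∀ x ∈ a :: r, x ≤ m) →
    patB k ((a :: r) ++ [m]) (m + 1) = patB k (a :: r) m ++ [k + r.length + 1] := by
  intro r
  induction r with
  | nil =>
    intro k a m hmem
    simp [patB]
  | cons b r' ih =>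
    intro k a m hmem
    simp only [List.cons_append, patB]
    have := ih (k + 1) b m (fun x hx => hmem x (by simp at hx ⊢; tauto))
    simp only [List.cons_append] at this
    rw [this]
    simp; ring_nf

theorem zip_map_append (keys : List (List Int)) (g : List Int → List Int) (f : List Int → Int) :
    (((keys.map g).zip keys).map (fun vk => vk.1 ++ [f vk.2])) = keys.map (fun k => g k ++ [f k]) := by
  induction keys with
  | nil => rfl
  | cons k ks ih => simp [ih]

theorem any_ne_iff (keys : List (List Int)) (i j : Int) :
    (keys.any (fun key => PySem.List.pyGetD key i 0 != PySem.List.pyGetD key j 0)) = true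
      ↔ colv keys i ≠ colv keys j := by
  simp only [List.any_eq_true, bne_iff_ne, ne_eq, colv, List.map_inj_left]
  constructor
  · rintro ⟨k, hk, hne⟩ h; exact hne (h k hk)
  · intro h; by_contra hc; push_neg at hc; exact h (fun k hk => hc k hk)

-- the main simultaneous loop invariant: after processing i = 1..m-1, both loops hold the same
-- boundary list 0 :: t (strictly increasing, all < m), the column at the last boundary equals
-- column m-1, and B's whole state is determined by that boundary list
theorem main_inv (keys : List (List Int)) : ∀ (m : Nat), 1 ≤ m →
    ∃ (t init : List Nat) (lastN : Nat),
      0 :: t = init ++ [lastN] ∧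
      List.Pairwise (· < ·) (0 :: t) ∧ (∀ x ∈ (0 :: t), x < m) ∧
      colv keys ((lastN : Nat) : Int) = colv keys ((m : Int) - 1) ∧
      (PySem.List.pyRange 1 (m : Int) 1).foldl (segStepA keys) [0]
        = (0 :: t).map (fun j => ((j : Nat) : Int)) ∧
      (PySem.List.pyRange 1 (m : Int) 1).foldl (stepB keys)
          ([0], [0], keys.map (fun k => [PySem.List.pyGetD k 0 0]), 0)
        = (patB 0 (0 :: t) m, (0 :: t).map (fun j => ((j : Nat) : Int)),
           keys.map (fun k => (0 :: t).map (fun b => PySem.List.pyGetD k ((b : Nat) : Int) 0)),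
           ((0 :: t).length : Int) - 1) := by
  intro m
  induction m with
  | zero => omega
  | succ m ih =>
    intro _
    by_cases hm1 : m = 0
    · subst hm1
      refine ⟨[], [], 0, by simp, by simp, by simp, by norm_num, ?_, ?_⟩
      · simp [PySem.List.pyRange_one_eq_nil]
      · simp [PySem.List.pyRange_one_eq_nil, patB, PySem.List.pyGetD_zero,
          List.getD_eq_getElem?_getD]
    · have hm : 1 ≤ m := by omega
      obtain ⟨t, init, lastN, hsplit, hpw, hlt, hcol, hA, hB⟩ := ih hm
      have hmemLast : lastN ∈ 0 :: t := by rw [hsplit]; simp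
      have hsplit' : PySem.List.pyRange 1 ((m + 1 : Nat) : Int) 1
          = PySem.List.pyRange 1 (m : Int) 1 ++ [(m : Int)] := by
        rw [show ((m + 1 : Nat) : Int) = (m : Int) + 1 by push_cast; ring]
        exact PySem.List.pyRange_one_succ_right (by exact_mod_cast hm)
      rw [hsplit', List.foldl_append, List.foldl_append, hA, hB]
      simp only [List.foldl_cons, List.foldl_nil]
      have hlastI : PySem.List.pyGetD ((0 :: t).map (fun j => ((j : Nat) : Int))) (-1) 0
          = ((lastN : Nat) : Int) := by
        rw [hsplit]
        simp only [List.map_append, List.map_cons, List.map_nil]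
        exact PySem.List.pyGetD_neg_one_append_singleton _ _ _
      have hcondA : (keys.any (fun key => PySem.List.pyGetD key (m : Int) 0
            != PySem.List.pyGetD key (PySem.List.pyGetD ((0 :: t).map (fun j => ((j : Nat) : Int))) (-1) 0) 0)) = true
          ↔ colv keys (m : Int) ≠ colv keys ((m : Int) - 1) := by
        rw [hlastI, any_ne_iff, hcol]
      have hcondB : (keys.any (fun key => PySem.List.pyGetD key (m : Int) 0
            != PySem.List.pyGetD key ((m : Int) - 1) 0)) = true
          ↔ colv keys (m : Int) ≠ colv keys ((m : Int) - 1) := any_ne_iff keys _ _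
      by_cases hdif : colv keys (m : Int) ≠ colv keys ((m : Int) - 1)
      · -- boundary at m: both sides append
        have hstepA : segStepA keys ((0 :: t).map (fun j => ((j : Nat) : Int))) (m : Int)
            = ((0 :: t).map (fun j => ((j : Nat) : Int))) ++ [(m : Int)] := by
          unfold segStepA
          rw [if_pos (hcondA.mpr hdif)]
        have hstepB : stepB keys
            (patB 0 (0 :: t) m, (0 :: t).map (fun j => ((j : Nat) : Int)),
             keys.map (fun k => (0 :: t).map (fun b => PySem.List.pyGetD k ((b : Nat) : Int) 0)),
             ((0 :: t).length : Int) - 1) (m : Int)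
            = (patB 0 (0 :: t) m ++ [(((0 :: t).length : Int) - 1) + 1],
               ((0 :: t).map (fun j => ((j : Nat) : Int))) ++ [(m : Int)],
               ((keys.map (fun k => (0 :: t).map (fun b => PySem.List.pyGetD k ((b : Nat) : Int) 0))).zip keys).map
                 (fun vk => vk.1 ++ [PySem.List.pyGetD vk.2 (m : Int) 0]),
               (((0 :: t).length : Int) - 1) + 1) := by
          unfold stepB
          rw [if_pos (hcondB.mpr hdif)]
        rw [hstepA, hstepB]
        refine ⟨t ++ [m], 0 :: t, m, by simp, ?_, ?_, ?_, by simp, ?_⟩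
        · rw [show (0 :: (t ++ [m])) = (0 :: t) ++ [m] by simp]
          rw [List.pairwise_append]
          exact ⟨hpw, by simp, fun x hx y hy => by simp at hy; subst hy; exact hlt x hx⟩
        · intro x hx
          rw [show (0 :: (t ++ [m])) = (0 :: t) ++ [m] by simp] at hx
          rcases List.mem_append.mp hx with h | h
          · have := hlt x h; omega
          · simp at h; omega
        · rw [show ((m + 1 : Nat) : Int) - 1 = (m : Int) by push_cast; ring]
        · have hpat : patB 0 ((0 :: t) ++ [m]) (m + 1) = patB 0 (0 :: t) m ++ [0 + (t.length : Int) + 1] :=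
            patB_boundary t 0 0 m (fun x hx => le_of_lt (hlt x hx))
          refine Prod.ext ?_ (Prod.ext ?_ (Prod.ext ?_ ?_))
          · show patB 0 (0 :: t) m ++ [(((0 :: t).length : Int) - 1) + 1] = patB 0 (0 :: (t ++ [m])) (m + 1)
            rw [show (0 :: (t ++ [m])) = (0 :: t) ++ [m] by simp, hpat]
            simp
          · simp
          · show (((keys.map (fun k => (0 :: t).map (fun b => PySem.List.pyGetD k ((b : Nat) : Int) 0))).zip keys).map
                 (fun vk => vk.1 ++ [PySem.List.pyGetD vk.2 (m : Int) 0]))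
              = keys.map (fun k => (0 :: (t ++ [m])).map (fun b => PySem.List.pyGetD k ((b : Nat) : Int) 0))
            rw [zip_map_append keys (fun k => (0 :: t).map (fun b => PySem.List.pyGetD k ((b : Nat) : Int) 0))
              (fun k => PySem.List.pyGetD k (m : Int) 0)]
            apply List.map_congr_left
            intro k _
            rw [show (0 :: (t ++ [m])) = (0 :: t) ++ [m] by simp]
            simp
          · show (((0 :: t).length : Int) - 1) + 1 = (((0 :: (t ++ [m])).length : Int)) - 1
            simp
      · -- no boundary at m: state unchanged except batch/value bookkeeping
        push_neg at hdif
        have hstepA : segStepA keys ((0 :: t).map (fun j => ((j : Nat) : Int))) (m : Int)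
            = (0 :: t).map (fun j => ((j : Nat) : Int)) := by
          unfold segStepA
          rw [if_neg (by intro hc; exact (hcondA.mp hc) hdif)]
        have hstepB : stepB keys
            (patB 0 (0 :: t) m, (0 :: t).map (fun j => ((j : Nat) : Int)),
             keys.map (fun k => (0 :: t).map (fun b => PySem.List.pyGetD k ((b : Nat) : Int) 0)),
             ((0 :: t).length : Int) - 1) (m : Int)
            = (patB 0 (0 :: t) m ++ [((0 :: t).length : Int) - 1],
               (0 :: t).map (fun j => ((j : Nat) : Int)),
               keys.map (fun k => (0 :: t).map (fun b => PySem.List.pyGetD k ((b : Nat) : Int) 0)),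
               ((0 :: t).length : Int) - 1) := by
          unfold stepB
          rw [if_neg (by intro hc; exact (hcondB.mp hc) hdif)]
        rw [hstepA, hstepB]
        refine ⟨t, init, lastN, hsplit, hpw, ?_, ?_, rfl, ?_⟩
        · intro x hx; have := hlt x hx; omega
        · rw [show ((m + 1 : Nat) : Int) - 1 = (m : Int) by push_cast; ring]
          rw [hcol, hdif]
        · have hpat : patB 0 (0 :: t) (m + 1) = patB 0 (0 :: t) m ++ [0 + (t.length : Int)] :=
            patB_snoc_end t 0 0 m (fun x hx => le_of_lt (hlt x hx))
          refine Prod.ext ?_ (Prod.ext rfl (Prod.ext rfl rfl))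
          · show patB 0 (0 :: t) m ++ [((0 :: t).length : Int) - 1] = patB 0 (0 :: t) (m + 1)
            rw [hpat]
            simp

-- ===== VERDICT (by name: the statement is the Claim_ definition above) =====
theorem extract_batch_segments_spec : Claim_equal_extract_batch_segments := by
  unfold Claim_equal_extract_batch_segments
  intro keys _ _
  unfold Spec_extract_batch_segments
  cases keys with
  | nil => rfl
  | cons k0 rest =>
    by_cases h0 : k0 = []
    · simp [h0, extract_batch_segments, extract_batch_segments_alt]
    · simp only [extract_batch_segments, extract_batch_segments_alt, if_neg h0]
      have hn : 1 ≤ k0.length := List.length_pos_iff.mpr h0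
      obtain ⟨t, init, lastN, hsplit, hpw, hlt, hcol, hA, hB⟩ := main_inv (k0 :: rest) k0.length hn
      have hr0 : PySem.List.pyRange 0 (k0.length : Int) 1
          = 0 :: PySem.List.pyRange 1 (k0.length : Int) 1 := by
        rw [PySem.List.pyRange_one_cons (by exact_mod_cast hn)]
        norm_num
      have hgd0 : PySem.List.pyGetD ([0] : List Int) (-1) 0 = 0 := by decide
      have hfirst : segStepA (k0 :: rest) [0] 0 = [0] := by
        unfold segStepA
        rw [hgd0]
        simp
      rw [hr0]
      simp only [List.foldl_cons, hfirst, hA, hB]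
      have hrep : PySem.List.pyRepeat ([0] : List Int) (k0.length : Int)
          = List.replicate k0.length 0 := by
        rw [PySem.List.pyRepeat_singleton]
        simp
      have hmapflat : ∀ (u : List Nat), List.flatMap (fun (a : Nat) => ([(a : Int)] : List Int)) u
          = List.map (fun (a : Nat) => (a : Int)) u := by
        intro u
        induction u with
        | nil => rfl
        | cons x xs ih => simp [ih]
      have hbf := backfill (0 :: t).tail [] 0 k0.length []
        ((0 :: t).map (fun j => ((j : Nat) : Int)) ++ [(k0.length : Int)])
        (by simp [List.map_append, hmapflat])
        (hpw.imp le_of_lt)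
        (fun x hx => le_of_lt (hlt x hx))
        rfl
      simp only [List.tail_cons] at hbf
      have hbf' : (PySem.List.pyRange 1
          ((((0 :: t).map (fun j => ((j : Nat) : Int)) ++ [(k0.length : Int)]).length : Int)) 1).foldl
          (fillStepA ((0 :: t).map (fun j => ((j : Nat) : Int)) ++ [(k0.length : Int)]))
          (List.replicate k0.length 0)
          = patB 0 (0 :: t) k0.length := by
        have h1 : ((0 : Nat) : Int) + 1 = 1 := by norm_num
        rw [← h1]
        have := hbf
        rw [show (([] : List Nat).length : Int) = ((0 : Nat) : Int) by simp] at this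
        simpa using this
      rw [hrep, hbf']
      have hval : ∀ key : List Int,
          (PySem.List.slice ((0 :: t).map (fun j => ((j : Nat) : Int)) ++ [(k0.length : Int)])
            none (some (-1))).map (fun b => PySem.List.pyGetD key b 0)
          = (0 :: t).map (fun b => PySem.List.pyGetD key ((b : Nat) : Int) 0) := by
        intro key
        rw [PySem.List.slice_to_neg_one, List.dropLast_concat]
        simp [PySem.List.pyGetD_zero, List.getD_eq_getElem?_getD]
      simp only [hval]
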